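-- pv_equiv track=rewrite | github.com/intel/e2eAIOK | e2eAIOK/common/utils.py | update_list
-- ===== SOURCE A (Python) =====
-- def update_list(orig, diff):
--     dict_diff = {}
--     for item in diff:
--         dict_diff[item['name']] = item
--     for i in range(len(orig)):
--         if orig[i]['name'] in dict_diff:
--             orig[i] = dict_diff[orig[i]['name']]
--     return orig
-- ===== SOURCE B (Python) =====
-- def update_list(orig, diff):
--     for i in range(len(orig)):
--         name = orig[i]['name']
--         for item in reversed(diff):
--             if item['name'] == name:
--                 orig[i] = item
--                 break
--     return orig
-- ===== Notes on version B (the rewrite author's own statement) =====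
-- stated objective: simpler
-- what changed: Drops the intermediate name->item dict: each orig item is replaced by the first name match found scanning diff in reverse (which is exactly the dict's last-wins entry).
import Mathlib
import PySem

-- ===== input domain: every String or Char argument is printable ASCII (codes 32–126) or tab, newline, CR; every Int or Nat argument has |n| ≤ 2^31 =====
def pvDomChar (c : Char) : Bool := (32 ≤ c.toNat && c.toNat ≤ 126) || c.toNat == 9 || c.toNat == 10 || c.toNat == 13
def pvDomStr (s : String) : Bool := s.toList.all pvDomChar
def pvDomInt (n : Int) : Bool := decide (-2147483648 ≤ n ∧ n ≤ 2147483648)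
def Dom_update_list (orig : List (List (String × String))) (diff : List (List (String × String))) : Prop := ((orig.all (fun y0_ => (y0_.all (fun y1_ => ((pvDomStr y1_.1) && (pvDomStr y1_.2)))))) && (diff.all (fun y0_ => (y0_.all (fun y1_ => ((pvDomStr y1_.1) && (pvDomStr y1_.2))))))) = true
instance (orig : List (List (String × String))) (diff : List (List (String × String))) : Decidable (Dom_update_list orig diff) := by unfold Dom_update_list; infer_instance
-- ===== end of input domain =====

-- B removes A's intermediate name->item dict (per-item reverse scan of diff instead);
-- both Pythons mutate `orig` in place and return it — the equivalence proved is about the return value.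

-- item['name'] with default "" (Pre_ guarantees the key is present, where Python A returns)
def pvName (item : List (String × String)) : String := (PySem.Dict.mk item).getD "name" ""

-- ===== PORT A =====
def update_list (orig : List (List (String × String))) (diff : List (List (String × String))) : List (List (String × String)) :=
  let dict_diff : PySem.Dict String (List (String × String)) :=
    diff.foldl (fun d item => d.insert (pvName item) item) PySem.Dict.empty
  orig.map (fun o =>
    if dict_diff.contains (pvName o) then dict_diff.getD (pvName o) o else o)

-- ===== PORT B =====
def update_list_alt (orig : List (List (String × String))) (diff : List (List (String × String))) : List (List (String × String)) :=
  orig.map (fun o =>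
    match diff.reverse.find? (fun item => pvName item == pvName o) with
    | some item => item
    | none => o)

-- ===== PRECONDITION & SPEC =====
-- Pre_ excludes exactly the inputs on which Python A raises KeyError: some item lacks the key 'name'.
def Pre_update_list (orig : List (List (String × String))) (diff : List (List (String × String))) : Prop :=
  (∀ it ∈ orig, ((PySem.Dict.mk it).get? "name").isSome) ∧ (∀ it ∈ diff, ((PySem.Dict.mk it).get? "name").isSome)
instance (orig : List (List (String × String))) (diff : List (List (String × String))) : Decidable (Pre_update_list orig diff) := by unfold Pre_update_list; infer_instance
def pvWitness_update_list : (List (List (String × String))) × (List (List (String × String))) :=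
  ([[("name", "a"), ("v", "1")], [("name", "b")]], [[("name", "a"), ("v", "2")], [("name", "a"), ("v", "3")]])

def Spec_update_list (orig : List (List (String × String))) (diff : List (List (String × String))) (out : List (List (String × String))) : Prop := out = update_list_alt orig diff
instance (orig : List (List (String × String))) (diff : List (List (String × String))) (out : List (List (String × String))) : Decidable (Spec_update_list orig diff out) := by unfold Spec_update_list; infer_instance

-- ===== CLAIM (what is proved, stated in full; the proofs are below) =====
def Claim_equal_update_list : Prop := ∀ (orig : List (List (String × String))) (diff : List (List (String × String))), Dom_update_list orig diff → Pre_update_list orig diff → Spec_update_list orig diff (update_list orig diff)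

-- ===== LEMMAS AND PROOFS =====

-- lookup in the dict built by A's first loop = last match in diff = first match of the reversed diff
lemma foldl_insert_get? (l : List (List (String × String))) (d : PySem.Dict String (List (String × String))) (k : String) :
    (l.foldl (fun d item => d.insert (pvName item) item) d).get? k
      = (l.reverse.find? (fun item => pvName item == k)).or (d.get? k) := by
  induction l generalizing d with
  | nil => simp
  | cons x xs ih =>
      simp only [List.foldl_cons, List.reverse_cons, List.find?_append, ih]
      cases hf : xs.reverse.find? (fun item => pvName item == k) with
      | some v => simp
      | none =>
          simp only [Option.none_or]
          rw [PySem.Dict.get?_insert]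
          by_cases h : pvName x = k
          · simp [List.find?, h]
          · have h' : ¬ k = pvName x := fun e => h e.symm
            simp [List.find?, h', show (pvName x == k) = false from beq_eq_false_iff_ne.mpr h]

-- ===== VERDICT (by name: the statement is the Claim_ definition above) =====
theorem update_list_spec : Claim_equal_update_list := by
  intro orig diff _ _
  unfold Spec_update_list update_list update_list_alt
  simp only
  apply List.map_congr_left
  intro o _
  have h := foldl_insert_get? diff PySem.Dict.empty (pvName o)
  simp only [PySem.Dict.get?_empty, Option.or_none] at h
  rw [PySem.Dict.contains_eq_isSome_get?, PySem.Dict.getD_eq_get?_getD, h]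
  cases diff.reverse.find? (fun item => pvName item == pvName o) <;> simp
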